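-- pv_equiv track=rewrite | github.com/as4401s/COVID-19-X_ray-image-classification | Efficientnet_B4/util.py | class_counter
-- ===== SOURCE A (Python) =====
-- def class_counter(data_labels):
--     """
--     This function counts and returns the number of images in each class
--     """
--     labels = ['1_Normal', '2_Non_Covid_19','3_Covid_19']
--
--     normal = 0
--     non_covid_19 = 0
--     covid_19 = 0
--
--     for i in data_labels:
--
--         if i==0:
--             normal += 1
--         elif i==1:
--             non_covid_19 += 1
--         else:
--             covid_19 += 1
--
--     return normal,non_covid_19,covid_19
-- ===== SOURCE B (Python) =====
-- def class_counter(data_labels):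
--     """
--     This function counts and returns the number of images in each class
--     """
--     total = len(data_labels)
--     normal = sum(1 for i in data_labels if i == 0)
--     non_covid_19 = sum(1 for i in data_labels if i == 1)
--     return normal, non_covid_19, total - normal - non_covid_19
-- ===== Notes on version B (the rewrite author's own statement) =====
-- stated objective: simpler
-- what changed: Replaces the single three-way branching accumulator loop by a length computation plus two targeted counting passes, deriving the third class by subtraction instead of an else-branch counter.
import Mathlib
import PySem

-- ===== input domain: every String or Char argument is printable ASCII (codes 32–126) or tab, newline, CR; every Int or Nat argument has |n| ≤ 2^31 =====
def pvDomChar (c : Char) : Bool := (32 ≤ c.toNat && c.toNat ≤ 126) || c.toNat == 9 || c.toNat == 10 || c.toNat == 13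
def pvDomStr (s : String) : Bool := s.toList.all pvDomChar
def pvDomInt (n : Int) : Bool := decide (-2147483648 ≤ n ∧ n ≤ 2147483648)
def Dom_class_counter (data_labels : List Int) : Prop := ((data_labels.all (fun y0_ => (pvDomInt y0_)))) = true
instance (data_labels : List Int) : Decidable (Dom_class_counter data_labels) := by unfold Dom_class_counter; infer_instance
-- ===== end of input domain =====

-- B replaces A's single three-way branching counter loop with length + two targeted
-- counting passes, deriving the third class by subtraction; objective: simpler.
-- ===== PORT A =====
-- labels list in A is unused; the loop's triple accumulator ported as a foldl
def class_counter (data_labels : List Int) : Int × Int × Int :=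
  data_labels.foldl
    (fun (acc : Int × Int × Int) (i : Int) =>
      let (normal, non_covid_19, covid_19) := acc
      if i == 0 then (normal + 1, non_covid_19, covid_19)
      else if i == 1 then (normal, non_covid_19 + 1, covid_19)
      else (normal, non_covid_19, covid_19 + 1))
    ((0 : Int), (0 : Int), (0 : Int))

-- ===== PORT B =====
def class_counter_alt (data_labels : List Int) : Int × Int × Int :=
  let total : Int := data_labels.length
  let normal : Int := (data_labels.filter (fun i => i == 0)).length
  let non_covid_19 : Int := (data_labels.filter (fun i => i == 1)).length
  (normal, non_covid_19, total - normal - non_covid_19)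

-- ===== PRECONDITION & SPEC =====
def Spec_class_counter (data_labels : List Int) (out : Int × Int × Int) : Prop := out = class_counter_alt data_labels
instance (data_labels : List Int) (out : Int × Int × Int) : Decidable (Spec_class_counter data_labels out) := by unfold Spec_class_counter; infer_instance

-- ===== CLAIM (what is proved, stated in full; the proofs are below) =====
def Claim_equal_class_counter : Prop := ∀ (data_labels : List Int), Dom_class_counter data_labels → Spec_class_counter data_labels (class_counter data_labels)

-- ===== LEMMAS AND PROOFS =====

-- ===== VERDICT (by name: the statement is the Claim_ definition above) =====
theorem fold_shift (xs : List Int) (a b c : Int) :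
    xs.foldl
      (fun acc i =>
        let (normal, non_covid_19, covid_19) := acc
        if i == 0 then (normal + 1, non_covid_19, covid_19)
        else if i == 1 then (normal, non_covid_19 + 1, covid_19)
        else (normal, non_covid_19, covid_19 + 1))
      (a, b, c)
    = ((a + ((xs.filter (fun i => i == 0)).length : Int)),
       (b + ((xs.filter (fun i => i == 1)).length : Int)),
       (c + ((xs.filter (fun i => ¬(i == 0) ∧ ¬(i == 1))).length : Int))) := by
  induction xs generalizing a b c with
  | nil => simp
  | cons x xs ih =>
    rw [List.foldl_cons]
    by_cases h0 : x = 0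
    · subst h0
      simp only [beq_self_eq_true, if_pos]
      rw [ih]
      simp [Prod.ext_iff]
      omega
    · by_cases h1 : x = 1
      · subst h1
        simp only [show ((1:Int) == 0) = false by decide, Bool.false_eq_true,
          beq_self_eq_true, if_pos]
        rw [ih]
        simp [Prod.ext_iff]
        omega
      · have e0 : (x == 0) = false := by simp [h0]
        have e1 : (x == 1) = false := by simp [h1]
        simp only [e0, e1, Bool.false_eq_true]
        rw [ih]
        simp [Prod.ext_iff, h0, h1]
        omega

theorem length_split (xs : List Int) :
    (xs.length : Int)
      = ((xs.filter (fun i => i == 0)).length : Int)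
      + ((xs.filter (fun i => i == 1)).length : Int)
      + ((xs.filter (fun i => ¬(i == 0) ∧ ¬(i == 1))).length : Int) := by
  induction xs with
  | nil => simp
  | cons x xs ih =>
    by_cases h0 : x = 0
    · subst h0; simp [ih]; ring
    · by_cases h1 : x = 1
      · subst h1; simp [h0, ih]; ring
      · simp [h0, h1, ih]; ring

theorem class_counter_spec : Claim_equal_class_counter := by
  intro xs _
  unfold Spec_class_counter class_counter class_counter_alt
  rw [fold_shift]
  have h := length_split xs
  simp only [Prod.mk.injEq, zero_add]
  refine ⟨trivial, trivial, ?_⟩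
  omega
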